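-- pv_equiv track=rewrite | github.com/haha523/algorithms-and-data-structures | lab3/task 3/src/a3.py | can_sort_with_k
-- ===== SOURCE A (Python) =====
-- def can_sort_with_k(n, k, sizes):
--     groups = [[] for _ in range(k)]
--
--     for i in range(n):
--         groups[i % k].append(sizes[i])
--
--     for group in groups:
--         group.sort()
--
--     sorted_sizes = []
--     for i in range(n):
--         sorted_sizes.append(groups[i % k][i // k])
--
--     return sorted_sizes == sorted(sizes)
-- ===== SOURCE B (Python) =====
-- def can_sort_with_k(n, k, sizes):
--     target = sorted(sizes)
--     if n != len(sizes):
--         # a stride-k rearrangement of the first n elements has n entries,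
--         # so it can only equal the fully sorted array when n == len(sizes)
--         return False
--     for r in range(k):
--         cnt = {}
--         for i in range(r, n, k):
--             x = sizes[i]
--             cnt[x] = cnt.get(x, 0) + 1
--         for i in range(r, n, k):
--             y = target[i]
--             c = cnt.get(y, 0)
--             if c == 0:
--                 return False
--             cnt[y] = c - 1
--     return True
-- ===== Notes on version B (the rewrite author's own statement) =====
-- stated objective: alternative
-- what changed: A builds k group lists by residue, sorts each group and rebuilds an interleaved array to compare with sorted(sizes); B sorts once globally, rejects when n != len(sizes), and per residue class checks multiset equality of sizes[r::k] against target[r::k] with a counting dict and early exit - no group lists, no per-group sorts, no rebuild; Pre_ excludes only negative n with an empty list, where A's True comes from range() clamping (it compares two empty lists) and B naturally returns False.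
-- outside the precondition, e.g. on can_sort_with_k(-1, 2, []): A returns True, B returns False
import Mathlib
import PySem

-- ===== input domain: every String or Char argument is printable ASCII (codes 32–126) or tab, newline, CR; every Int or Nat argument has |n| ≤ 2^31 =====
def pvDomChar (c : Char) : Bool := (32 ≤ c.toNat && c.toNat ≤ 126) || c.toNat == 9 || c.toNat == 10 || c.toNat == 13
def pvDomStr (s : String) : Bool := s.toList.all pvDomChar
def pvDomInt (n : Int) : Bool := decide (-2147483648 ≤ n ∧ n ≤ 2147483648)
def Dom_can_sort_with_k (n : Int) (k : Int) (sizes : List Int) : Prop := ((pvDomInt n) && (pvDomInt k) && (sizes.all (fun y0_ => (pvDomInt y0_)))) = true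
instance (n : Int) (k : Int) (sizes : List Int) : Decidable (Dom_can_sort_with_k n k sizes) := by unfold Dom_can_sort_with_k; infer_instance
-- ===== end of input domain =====

-- B replaces A's build-k-groups / sort-each / re-interleave pipeline by one global sort plus a
-- per-residue counting-dict multiset check with early exit (objective: alternative).

-- ===== PORT A =====
def pvAGroups0 (k : Int) : List (List Int) :=
  (PySem.List.pyRange 0 k 1).map (fun _ => ([] : List Int))

def pvAFill (n : Int) (k : Int) (sizes : List Int) (gs0 : List (List Int)) : List (List Int) :=
  (PySem.List.pyRange 0 n 1).foldl (fun gs i =>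
    PySem.List.pySetD gs (PySem.Int.mod i k)
      (PySem.List.pyGetD gs (PySem.Int.mod i k) [] ++ [PySem.List.pyGetD sizes i 0])) gs0

def pvABuild (n : Int) (k : Int) (gs : List (List Int)) : List Int :=
  (PySem.List.pyRange 0 n 1).foldl (fun acc i =>
    acc ++ [PySem.List.pyGetD (PySem.List.pyGetD gs (PySem.Int.mod i k) [])
              (PySem.Int.floordiv i k) 0]) []

def can_sort_with_k (n : Int) (k : Int) (sizes : List Int) : Bool :=
  decide (pvABuild n k ((pvAFill n k sizes (pvAGroups0 k)).map
            (fun g => PySem.List.sorted g (fun x => x) false))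
          = PySem.List.sorted sizes (fun x => x) false)


-- ===== PORT B =====
def pvCountAt (sizes : List Int) (idxs : List Int) : PySem.Dict Int Int :=
  idxs.foldl (fun d i =>
    d.insert (PySem.List.pyGetD sizes i 0) (d.getD (PySem.List.pyGetD sizes i 0) 0 + 1))
    PySem.Dict.empty

def pvConsume (target : List Int) : PySem.Dict Int Int → List Int → Bool
  | _, [] => true
  | cnt, i :: rest =>
    let y := PySem.List.pyGetD target i 0
    let c := cnt.getD y 0
    if c == 0 then false else pvConsume target (cnt.insert y (c - 1)) rest

def pvResidues (n : Int) (k : Int) (sizes : List Int) (target : List Int) : List Int → Bool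
  | [] => true
  | r :: rs =>
    if pvConsume target (pvCountAt sizes (PySem.List.pyRange r n k)) (PySem.List.pyRange r n k)
    then pvResidues n k sizes target rs else false

def can_sort_with_k_alt (n : Int) (k : Int) (sizes : List Int) : Bool :=
  -- a stride-k rearrangement of the first n elements has n entries, so it can only equal
  -- the fully sorted array when n == len(sizes)
  if n ≠ (sizes.length : Int) then false
  else pvResidues n k sizes (PySem.List.sorted sizes (fun x => x) false) (PySem.List.pyRange 0 k 1)


-- ===== PRECONDITION & SPEC =====
-- Pre_ excludes the inputs where A raises (k ≤ 0 with 0 < n: ZeroDivisionError / IndexError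
-- on the empty group list; n > len(sizes): IndexError) and the single corner of negative n
-- with an empty list, where A's True is an artefact of range() clamping a negative bound
-- (it compares two empty lists) and B naturally returns False.
def Pre_can_sort_with_k (n : Int) (k : Int) (sizes : List Int) : Prop :=
  n ≤ (sizes.length : Int) ∧ (1 ≤ k ∨ n ≤ 0) ∧ (0 ≤ n ∨ sizes ≠ [])
instance (n : Int) (k : Int) (sizes : List Int) : Decidable (Pre_can_sort_with_k n k sizes) := by
  unfold Pre_can_sort_with_k; infer_instance

def pvWitness_can_sort_with_k : Int × Int × List Int := (4, 2, [4, 3, 2, 1])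

def Spec_can_sort_with_k (n : Int) (k : Int) (sizes : List Int) (out : Bool) : Prop :=
  out = can_sort_with_k_alt n k sizes
instance (n : Int) (k : Int) (sizes : List Int) (out : Bool) :
    Decidable (Spec_can_sort_with_k n k sizes out) := by
  unfold Spec_can_sort_with_k; infer_instance

-- ===== CLAIM (what is proved, stated in full; the proofs are below) =====
def Claim_equal_can_sort_with_k : Prop :=
  ∀ (n : Int) (k : Int) (sizes : List Int), Dom_can_sort_with_k n k sizes →
    Pre_can_sort_with_k n k sizes → Spec_can_sort_with_k n k sizes (can_sort_with_k n k sizes)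

-- ===== LEMMAS AND PROOFS =====

-- the elements of xs at indices ≡ r (mod k'), in order
def pvF (k' : Nat) (xs : List Int) (r : Nat) : List Int :=
  ((List.range xs.length).filter (fun i => decide (i % k' = r))).map (fun i => xs.getD i 0)

lemma pvMem_filter (k' r : Nat) (hr : r < k') (L j : Nat) :
    (r + j * k') ∈ (List.range L).filter (fun i => decide (i % k' = r)) ↔ r + j * k' < L := by
  simp [List.mem_filter, List.mem_range, Nat.add_mul_mod_self_right, Nat.mod_eq_of_lt hr]

lemma pvFilter_eq_map (k' r : Nat) (hk : 0 < k') (hr : r < k') (L : Nat) :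
    (List.range L).filter (fun i => decide (i % k' = r)) =
      (List.range (((List.range L).filter (fun i => decide (i % k' = r))).length)).map
        (fun j => r + j * k') := by
  induction L with
  | zero => simp
  | succ L ih =>
    rw [List.range_succ, List.filter_append]
    by_cases h : L % k' = r
    · rw [show List.filter (fun i => decide (i % k' = r)) [L] = [L] by simp [h]]
      set c := ((List.range L).filter fun i => decide (i % k' = r)).length with hc
      have hm : L = r + L / k' * k' := by rw [← h]; exact (Nat.mod_add_div' L k').symm
      set m := L / k' with hmdef
      have key : ∀ j, j < c ↔ j < m := by
        intro j
        have h1 := pvMem_filter k' r hr L j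
        have h2 : (r + j * k') ∈ (List.range L).filter (fun i => decide (i % k' = r)) ↔ j < c := by
          conv_lhs => rw [ih]
          simp only [List.mem_map, List.mem_range]
          constructor
          · rintro ⟨j', hj', he⟩
            have : j' * k' = j * k' := by omega
            have : j' = j := Nat.eq_of_mul_eq_mul_right hk this
            omega
          · intro hj; exact ⟨j, hj, rfl⟩
        have h3 : r + j * k' < L ↔ j < m := by
          rw [hm]
          constructor
          · intro hx
            have : j * k' < m * k' := by omega
            exact Nat.lt_of_mul_lt_mul_right this
          · intro hx
            have : j * k' < m * k' := Nat.mul_lt_mul_right hk |>.mpr hx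
            omega
        rw [← h2, h1, h3]
      have hcm : c = m := by have k1 := key c; have k2 := key m; omega
      have hL : L = r + c * k' := by rw [hcm]; exact hm
      rw [List.length_append, List.length_cons, List.length_nil, ← hc,
          List.range_succ, List.map_append, ← ih]
      simp [← hL]
    · rw [show List.filter (fun i => decide (i % k' = r)) [L] = [] by simp [h]]
      simp only [List.append_nil]
      exact ih

lemma pvCount_lt_iff (k' r : Nat) (hk : 0 < k') (hr : r < k') (L j : Nat) :
    j < ((List.range L).filter (fun i => decide (i % k' = r))).length ↔ r + j * k' < L := by
  rw [← pvMem_filter k' r hr L j]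
  conv_rhs => rw [pvFilter_eq_map k' r hk hr L]
  simp only [List.mem_map, List.mem_range]
  constructor
  · intro hj; exact ⟨j, hj, rfl⟩
  · rintro ⟨j', hj', he⟩
    have : j' * k' = j * k' := by omega
    have : j' = j := Nat.eq_of_mul_eq_mul_right hk this
    omega

lemma pvF_getElem? (k' : Nat) (xs : List Int) (r j : Nat) (hk : 0 < k') (hr : r < k') :
    (pvF k' xs r)[j]? = xs[r + j * k']? := by
  unfold pvF
  conv_lhs => rw [pvFilter_eq_map k' r hk hr xs.length, List.map_map]
  by_cases hj : j < ((List.range xs.length).filter (fun i => decide (i % k' = r))).length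
  · have hlt : r + j * k' < xs.length := (pvCount_lt_iff k' r hk hr xs.length j).mp hj
    rw [List.getElem?_map, List.getElem?_range hj]
    simp [List.getElem?_eq_getElem hlt]
  · have hge : ¬ (r + j * k' < xs.length) := fun h => hj ((pvCount_lt_iff k' r hk hr xs.length j).mpr h)
    rw [List.getElem?_eq_none (by simpa using Nat.le_of_not_lt hj),
        List.getElem?_eq_none (Nat.le_of_not_lt hge)]

lemma pvDecomp (k' : Nat) (hk : 0 < k') (xs ys : List Int)
    (h : ∀ r, r < k' → pvF k' xs r = pvF k' ys r) : xs = ys := by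
  apply List.ext_getElem?
  intro i
  have h1 := pvF_getElem? k' xs (i % k') (i / k') hk (Nat.mod_lt i hk)
  have h2 := pvF_getElem? k' ys (i % k') (i / k') hk (Nat.mod_lt i hk)
  rw [Nat.mod_add_div' i k'] at h1 h2
  rw [← h1, ← h2, h _ (Nat.mod_lt i hk)]

lemma pvF_length (k' : Nat) (xs : List Int) (r : Nat) :
    (pvF k' xs r).length = ((List.range xs.length).filter (fun i => decide (i % k' = r))).length := by
  simp [pvF]

lemma pvTable (k' : Nat) (_hk : 0 < k') (f : Nat → Nat) (hf : ∀ i, f i < k') (val : Nat → Int) :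
    ∀ (l : List Nat) (gs : List (List Int)), gs.length = k' → ∀ r : Nat, r < k' →
    (l.foldl (fun gs i => PySem.List.pySetD gs ((f i : Nat) : Int)
        (gs.getD (f i) [] ++ [val i])) gs).getD r [] =
      gs.getD r [] ++ (l.filter (fun i => decide (f i = r))).map val := by
  intro l
  induction l with
  | nil => intro gs _ r _; simp
  | cons i t ih =>
    intro gs hlen r hr
    rw [List.foldl_cons]
    have hlen' : (PySem.List.pySetD gs ((f i : Nat) : Int) (gs.getD (f i) [] ++ [val i])).length = k' := by
      rw [PySem.List.length_pySetD]; exact hlen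
    rw [ih _ hlen' r hr]
    have hget : (PySem.List.pySetD gs ((f i : Nat) : Int) (gs.getD (f i) [] ++ [val i])).getD r [] =
        if r = f i then gs.getD (f i) [] ++ [val i] else gs.getD r [] := by
      have h := PySem.List.pyGetD_pySetD_natCast gs (f i) r (gs.getD (f i) [] ++ [val i]) []
        (by rw [hlen]; exact hf i)
      rw [PySem.List.pyGetD_natCast] at h
      rw [h]
      split_ifs with h1
      · rfl
      · rw [PySem.List.pyGetD_natCast]
    rw [hget]
    by_cases h : f i = r
    · rw [List.filter_cons_of_pos (by simp [h]), if_pos h.symm, List.map_cons, h]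
      simp
    · rw [List.filter_cons_of_neg (by simp [h]), if_neg (fun e => h e.symm)]

lemma pvAFill_length (n k : Int) (sizes : List Int) (gs : List (List Int)) :
    (pvAFill n k sizes gs).length = gs.length := by
  unfold pvAFill
  generalize PySem.List.pyRange 0 n 1 = l
  induction l generalizing gs with
  | nil => rfl
  | cons i t ih => rw [List.foldl_cons, ih, PySem.List.length_pySetD]

lemma pvGroups0_getD (k : Int) (r : Nat) : (pvAGroups0 k).getD r [] = [] := by
  unfold pvAGroups0
  rw [List.getD_eq_getElem?_getD, List.getElem?_map]
  cases (PySem.List.pyRange 0 k 1)[r]? <;> rfl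

lemma pvGroups0_length (k' : Nat) : (pvAGroups0 (k' : Int)).length = k' := by
  unfold pvAGroups0
  rw [List.length_map, PySem.List.length_pyRange_one]
  simp

lemma pvFill_getD (k' : Nat) (hk : 0 < k') (sizes : List Int) (r : Nat) (hr : r < k') :
    (pvAFill (sizes.length : Int) (k' : Int) sizes (pvAGroups0 (k' : Int))).getD r []
      = pvF k' sizes r := by
  unfold pvAFill
  rw [PySem.List.pyRange_zero_natCast, List.foldl_map]
  have hcongr : (List.range sizes.length).foldl
      (fun gs (i : Nat) => PySem.List.pySetD gs (PySem.Int.mod (i : Int) (k' : Int))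
        (PySem.List.pyGetD gs (PySem.Int.mod (i : Int) (k' : Int)) []
          ++ [PySem.List.pyGetD sizes (i : Int) 0])) (pvAGroups0 (k' : Int)) =
      (List.range sizes.length).foldl
      (fun gs (i : Nat) => PySem.List.pySetD gs ((i % k' : Nat) : Int)
        (gs.getD (i % k') [] ++ [sizes.getD i 0])) (pvAGroups0 (k' : Int)) := by
    apply PySem.List.foldl_congr_mem
    intro acc x _
    simp only [PySem.Int.mod_natCast, PySem.List.pyGetD_natCast]
  rw [hcongr, pvTable k' hk (fun i => i % k') (fun i => Nat.mod_lt i hk) (fun i => sizes.getD i 0)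
    (List.range sizes.length) _ (pvGroups0_length k') r hr, pvGroups0_getD]
  simp [pvF]

lemma pvSortedGroups_getD (k' : Nat) (hk : 0 < k') (sizes : List Int) (r : Nat) (hr : r < k') :
    (((pvAFill (sizes.length : Int) (k' : Int) sizes (pvAGroups0 (k' : Int))).map
        (fun g => PySem.List.sorted g (fun x => x) false)).getD r [])
      = PySem.List.sorted (pvF k' sizes r) (fun x => x) false := by
  have hlen : r < (pvAFill (sizes.length : Int) (k' : Int) sizes (pvAGroups0 (k' : Int))).length := by
    rw [pvAFill_length, pvGroups0_length]; exact hr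
  rw [List.getD_eq_getElem?_getD, List.getElem?_map, List.getElem?_eq_getElem hlen]
  simp only [Option.map_some, Option.getD_some]
  rw [← List.getD_eq_getElem _ _ hlen, pvFill_getD k' hk sizes r hr]

lemma pvBuild_eq (k' : Nat) (hk : 0 < k') (sizes : List Int) :
    pvABuild (sizes.length : Int) (k' : Int)
        ((pvAFill (sizes.length : Int) (k' : Int) sizes (pvAGroups0 (k' : Int))).map
          (fun g => PySem.List.sorted g (fun x => x) false))
      = (List.range sizes.length).map
          (fun i => (PySem.List.sorted (pvF k' sizes (i % k')) (fun x => x) false).getD (i / k') 0) := by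
  unfold pvABuild
  rw [PySem.List.foldl_append_singleton_eq_map, List.nil_append,
      PySem.List.pyRange_zero_natCast, List.map_map]
  apply List.map_congr_left
  intro i _
  simp only [Function.comp]
  rw [PySem.Int.mod_natCast, PySem.Int.floordiv_natCast, PySem.List.pyGetD_natCast,
      PySem.List.pyGetD_natCast, pvSortedGroups_getD k' hk sizes (i % k') (Nat.mod_lt i hk)]

lemma pvBuilt_resid (k' : Nat) (hk : 0 < k') (sizes : List Int) (r : Nat) (hr : r < k') :
    pvF k' ((List.range sizes.length).map
        (fun i => (PySem.List.sorted (pvF k' sizes (i % k')) (fun x => x) false).getD (i / k') 0)) r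
      = PySem.List.sorted (pvF k' sizes r) (fun x => x) false := by
  apply List.ext_getElem?
  intro j
  rw [pvF_getElem? k' _ r j hk hr]
  have hiff : j < (pvF k' sizes r).length ↔ r + j * k' < sizes.length := by
    rw [pvF_length]; exact pvCount_lt_iff k' r hk hr sizes.length j
  by_cases hj : r + j * k' < sizes.length
  · rw [List.getElem?_map, List.getElem?_range (by simpa using hj)]
    simp only [Option.map_some]
    rw [Nat.add_mul_mod_self_right, Nat.mod_eq_of_lt hr, Nat.add_mul_div_right r j hk,
        Nat.div_eq_of_lt hr, Nat.zero_add]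
    have hjlen : j < (PySem.List.sorted (pvF k' sizes r) (fun x => x) false).length := by
      rw [PySem.List.length_sorted]; exact hiff.mpr hj
    rw [List.getElem?_eq_getElem hjlen, List.getD_eq_getElem _ _ hjlen]
  · rw [List.getElem?_eq_none (by simpa using Nat.le_of_not_lt hj), List.getElem?_eq_none (by
      rw [PySem.List.length_sorted]
      exact Nat.le_of_not_lt (fun hlt => hj (hiff.mp hlt)))]

lemma pvA_iff (k' : Nat) (hk : 0 < k') (sizes : List Int) :
    (can_sort_with_k (sizes.length : Int) (k' : Int) sizes = true) ↔
      ∀ r, r < k' → PySem.List.sorted (pvF k' sizes r) (fun x => x) false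
        = pvF k' (PySem.List.sorted sizes (fun x => x) false) r := by
  unfold can_sort_with_k
  rw [decide_eq_true_iff, pvBuild_eq k' hk sizes]
  constructor
  · intro h r hr
    rw [← pvBuilt_resid k' hk sizes r hr, h]
  · intro h
    apply pvDecomp k' hk
    intro r hr
    rw [pvBuilt_resid k' hk sizes r hr, h r hr]

lemma pvIdxVals (k' r : Nat) (hk : 0 < k') (hr : r < k') (xs : List Int) :
    (PySem.List.pyRange (r : Int) (xs.length : Int) (k' : Int)).map
        (fun i => PySem.List.pyGetD xs i 0) = pvF k' xs r := by
  rw [PySem.List.pyRange_of_pos (r : Int) (xs.length : Int) (s := (k' : Int))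
      (by exact_mod_cast hk), List.map_map]
  set L := xs.length with hL
  set M := (if (r : Int) < (L : Int) then (((L : Int) - r + k' - 1) / k').toNat else 0) with hM
  have hMiff : ∀ j : Nat, j < M ↔ r + j * k' < L := by
    intro j
    by_cases hrL : r < L
    · rw [hM, if_pos (by exact_mod_cast hrL)]
      have e1 : ((L : Int) - r + k' - 1) = ((L + k' - r - 1 : Nat) : Int) := by omega
      rw [e1, ← Int.natCast_div, Int.toNat_natCast]
      constructor
      · intro hj
        have h2 : (j + 1) * k' ≤ L + k' - r - 1 :=
          (Nat.le_div_iff_mul_le hk).1 (Nat.succ_le_of_lt hj)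
        rw [Nat.succ_mul] at h2
        omega
      · intro hj
        have h2 : (j + 1) * k' ≤ L + k' - r - 1 := by rw [Nat.succ_mul]; omega
        exact Nat.lt_of_succ_le ((Nat.le_div_iff_mul_le hk).2 h2)
    · rw [hM, if_neg (by exact_mod_cast hrL)]
      have : L ≤ r := Nat.le_of_not_lt hrL
      constructor
      · omega
      · intro h; exfalso; omega
  have hc := fun j => pvCount_lt_iff k' r hk hr L j
  have hMc : M = ((List.range L).filter (fun i => decide (i % k' = r))).length := by
    have h1 := hMiff (((List.range L).filter (fun i => decide (i % k' = r))).length)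
    have h2 := hc M
    have h3 := hMiff M
    have h4 := hc (((List.range L).filter (fun i => decide (i % k' = r))).length)
    omega
  unfold pvF
  rw [← hL, pvFilter_eq_map k' r hk hr L, List.map_map, ← hMc]
  apply List.map_congr_left
  intro j _
  simp only [Function.comp]
  have : ((r : Int) + (k' : Int) * (j : Int)) = ((r + j * k' : Nat) : Int) := by push_cast; ring
  rw [this, PySem.List.pyGetD_natCast]

lemma pvCountAt_eq (sizes idxs : List Int) :
    pvCountAt sizes idxs =
      PySem.Dict.counter (idxs.map (fun i => PySem.List.pyGetD sizes i 0)) := by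
  rw [← PySem.Dict.foldl_insert_getD_add_one_eq_counter, List.foldl_map]
  rfl

lemma pvCount_cons_int (a b : Int) (l : List Int) :
    (((b :: l).count a : Nat) : Int) = ((l.count a : Nat) : Int) + (if a = b then 1 else 0) := by
  by_cases h : a = b <;> simp [h, eq_comm]

lemma pvConsume_iff (target : List Int) : ∀ (idxs : List Int) (d : PySem.Dict Int Int),
    (∀ x, 0 ≤ d.getD x 0) →
    (pvConsume target d idxs = true ↔
      ∀ x : Int, (((idxs.map (fun i => PySem.List.pyGetD target i 0)).count x : Nat) : Int)
        ≤ d.getD x 0) := by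
  intro idxs
  induction idxs with
  | nil =>
    intro d hd
    simp only [pvConsume, List.map_nil]
    constructor
    · intro _ x; simpa using hd x
    · intro _; trivial
  | cons i rest ih =>
    intro d hd
    simp only [pvConsume, List.map_cons]
    by_cases h0 : d.getD (PySem.List.pyGetD target i 0) 0 = 0
    · rw [if_pos (by simpa using h0)]
      constructor
      · intro hfalse; cases hfalse
      · intro hall
        exfalso
        have hx := hall (PySem.List.pyGetD target i 0)
        rw [pvCount_cons_int] at hx
        rw [if_pos rfl] at hx
        omega
    · rw [if_neg (by simpa using h0)]
      have hpos : 1 ≤ d.getD (PySem.List.pyGetD target i 0) 0 := by have := hd (PySem.List.pyGetD target i 0); omega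
      have hinv : ∀ x, 0 ≤ (d.insert (PySem.List.pyGetD target i 0)
          (d.getD (PySem.List.pyGetD target i 0) 0 - 1)).getD x 0 := by
        intro x
        rw [PySem.Dict.getD_insert]
        split_ifs with hxy
        · omega
        · exact hd x
      rw [ih _ hinv]
      constructor
      · intro hall x
        have hx := hall x
        rw [PySem.Dict.getD_insert] at hx
        rw [pvCount_cons_int]
        split_ifs at hx ⊢ with hxy
        · rw [hxy] at hx ⊢; omega
        · omega
      · intro hall x
        have hx := hall x
        rw [pvCount_cons_int] at hx
        rw [PySem.Dict.getD_insert]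
        split_ifs at hx ⊢ with hxy
        · rw [hxy] at hx ⊢; omega
        · omega

lemma pvV_pairwise (k' : Nat) (hk : 0 < k') (r : Nat) (hr : r < k') (sizes : List Int) :
    (pvF k' (PySem.List.sorted sizes (fun x => x) false) r).Pairwise (· ≤ ·) := by
  set target := PySem.List.sorted sizes (fun x => x) false with htarget
  rw [List.pairwise_iff_getElem]
  intro p q hp hq hpq
  have h1 := pvF_getElem? k' target r p hk hr
  have h2 := pvF_getElem? k' target r q hk hr
  rw [List.getElem?_eq_getElem hp] at h1
  rw [List.getElem?_eq_getElem hq] at h2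
  obtain ⟨hp', he1⟩ := List.getElem?_eq_some_iff.1 h1.symm
  obtain ⟨hq', he2⟩ := List.getElem?_eq_some_iff.1 h2.symm
  rw [← he1, ← he2]
  exact PySem.List.sorted_id_getElem_mono sizes
    (Nat.add_le_add_left (Nat.mul_le_mul_right k' (Nat.le_of_lt hpq)) r) hq'

lemma pvResidueCheck (k' : Nat) (hk : 0 < k') (r : Nat) (hr : r < k') (sizes : List Int) :
    (pvConsume (PySem.List.sorted sizes (fun x => x) false)
        (pvCountAt sizes (PySem.List.pyRange (r : Int) (sizes.length : Int) (k' : Int)))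
        (PySem.List.pyRange (r : Int) (sizes.length : Int) (k' : Int)) = true)
      ↔ PySem.List.sorted (pvF k' sizes r) (fun x => x) false
          = pvF k' (PySem.List.sorted sizes (fun x => x) false) r := by
  set target := PySem.List.sorted sizes (fun x => x) false with htarget
  have hlt : target.length = sizes.length := PySem.List.length_sorted _ _ _
  have hu := pvIdxVals k' r hk hr sizes
  have hv : (PySem.List.pyRange (r : Int) (sizes.length : Int) (k' : Int)).map
      (fun i => PySem.List.pyGetD target i 0) = pvF k' target r := by
    have h := pvIdxVals k' r hk hr target
    rw [hlt] at h
    exact h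
  rw [pvCountAt_eq, hu, pvConsume_iff target _ _
    (fun x => by rw [PySem.Dict.getD_counter]; positivity), hv]
  have hlen : (pvF k' target r).length = (pvF k' sizes r).length := by
    rw [pvF_length, pvF_length, hlt]
  constructor
  · intro hcount
    have hle : ((pvF k' target r : List Int) : Multiset Int) ≤ ((pvF k' sizes r : List Int) : Multiset Int) := by
      rw [Multiset.le_iff_count]
      intro x
      have := hcount x
      rw [PySem.Dict.getD_counter] at this
      simpa using this
    have heq := Multiset.eq_of_le_of_card_le hle (by simpa using Nat.le_of_eq hlen.symm)
    have hperm : (pvF k' target r).Perm (pvF k' sizes r) := by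
      exact Multiset.coe_eq_coe.1 heq
    exact PySem.List.sorted_id_eq_of_perm_of_pairwise _ _ hperm (pvV_pairwise k' hk r hr sizes)
  · intro hs x
    have hperm : (pvF k' target r).Perm (pvF k' sizes r) := by
      rw [← hs]
      exact PySem.List.sorted_perm _ _ _
    rw [PySem.Dict.getD_counter, hperm.count_eq x]

lemma pvResidues_iff (n k : Int) (sizes target : List Int) : ∀ rs : List Int,
    (pvResidues n k sizes target rs = true ↔
      ∀ r ∈ rs, pvConsume target (pvCountAt sizes (PySem.List.pyRange r n k))
        (PySem.List.pyRange r n k) = true) := by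
  intro rs
  induction rs with
  | nil => simp [pvResidues]
  | cons r rs ih =>
    simp only [pvResidues]
    split_ifs with h
    · rw [ih]
      constructor
      · intro hall r' hr'
        rcases List.mem_cons.1 hr' with he | hm
        · subst he; exact h
        · exact hall r' hm
      · intro hall r' hr'; exact hall r' (List.mem_cons_of_mem _ hr')
    · constructor
      · intro hfalse; cases hfalse
      · intro hall; exact absurd (hall r (List.mem_cons_self)) h

lemma pvB_iff (k' : Nat) (hk : 0 < k') (sizes : List Int) :
    (can_sort_with_k_alt (sizes.length : Int) (k' : Int) sizes = true) ↔
      ∀ r, r < k' → PySem.List.sorted (pvF k' sizes r) (fun x => x) false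
        = pvF k' (PySem.List.sorted sizes (fun x => x) false) r := by
  unfold can_sort_with_k_alt
  rw [if_neg (by simp), pvResidues_iff]
  constructor
  · intro h r hr
    have hm : ((r : Nat) : Int) ∈ PySem.List.pyRange 0 (k' : Int) 1 :=
      PySem.List.mem_pyRange_one.2 ⟨by positivity, by exact_mod_cast hr⟩
    exact (pvResidueCheck k' hk r hr sizes).1 (h _ hm)
  · intro h r hrmem
    obtain ⟨h0, hk2⟩ := PySem.List.mem_pyRange_one.1 hrmem
    have hr' : r = ((r.toNat : Nat) : Int) := by omega
    have hrlt : r.toNat < k' := by omega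
    rw [hr']
    exact (pvResidueCheck k' hk r.toNat hrlt sizes).2 (h r.toNat hrlt)

lemma pvABuild_length (n k : Int) (gs : List (List Int)) :
    (pvABuild n k gs).length = n.toNat := by
  unfold pvABuild
  rw [PySem.List.foldl_append_singleton_eq_map, List.nil_append, List.length_map,
      PySem.List.length_pyRange_one]
  simp

lemma pvA_emptybuild (n k : Int) (sizes : List Int) (hn : n ≤ 0) :
    can_sort_with_k n k sizes =
      decide (([] : List Int) = PySem.List.sorted sizes (fun x => x) false) := by
  unfold can_sort_with_k pvABuild
  rw [PySem.List.pyRange_one_eq_nil hn]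
  rfl

lemma pvB_zero_nil (k : Int) (hk : k ≤ 0) : can_sort_with_k_alt 0 k [] = true := by
  unfold can_sort_with_k_alt
  rw [if_neg (by simp), PySem.List.pyRange_one_eq_nil hk]
  rfl

-- ===== VERDICT (by name: the statement is the Claim_ definition above) =====
theorem can_sort_with_k_spec : Claim_equal_can_sort_with_k := by
  intro n k sizes _ hpre
  obtain ⟨hnlen, hkor, hns⟩ := hpre
  unfold Spec_can_sort_with_k
  by_cases h0n : 0 ≤ n
  case neg =>
    -- n < 0 and sizes ≠ []: A compares [] with a nonempty sorted list, B fails the length test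
    have hsz : sizes ≠ [] := by
      rcases hns with h | h
      · omega
      · exact h
    have hA : can_sort_with_k n k sizes = false := by
      rw [pvA_emptybuild n k sizes (by omega)]
      apply decide_eq_false
      intro heq
      have := congrArg List.length heq
      rw [PySem.List.length_sorted] at this
      simp at this
      exact hsz (List.eq_nil_of_length_eq_zero this.symm)
    have hB : can_sort_with_k_alt n k sizes = false := by
      unfold can_sort_with_k_alt
      rw [if_pos (by omega)]
    rw [hA, hB]
  by_cases hk : 1 ≤ k
  · have hkpos : 0 < k.toNat := by omega
    have hk2 : k = ((k.toNat : Nat) : Int) := by omega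
    by_cases hN : n = (sizes.length : Int)
    · -- main case: n = len(sizes)
      rw [hN, hk2]
      have hA := pvA_iff k.toNat hkpos sizes
      have hB := pvB_iff k.toNat hkpos sizes
      by_cases h : ∀ r, r < k.toNat → PySem.List.sorted (pvF k.toNat sizes r) (fun x => x) false
          = pvF k.toNat (PySem.List.sorted sizes (fun x => x) false) r
      · rw [hA.2 h, hB.2 h]
      · have ha : can_sort_with_k (sizes.length : Int) ((k.toNat : Nat) : Int) sizes ≠ true :=
          fun hc => h (hA.1 hc)
        have hb : can_sort_with_k_alt (sizes.length : Int) ((k.toNat : Nat) : Int) sizes ≠ true :=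
          fun hc => h (hB.1 hc)
        simp only [ne_eq, Bool.not_eq_true] at ha hb
        rw [ha, hb]
    · -- n < len(sizes): the rebuild is too short, both sides are false
      have hA : can_sort_with_k n k sizes = false := by
        unfold can_sort_with_k
        apply decide_eq_false
        intro heq
        have := congrArg List.length heq
        rw [pvABuild_length, PySem.List.length_sorted] at this
        omega
      have hB : can_sort_with_k_alt n k sizes = false := by
        unfold can_sort_with_k_alt
        rw [if_pos hN]
      rw [hA, hB]
  · -- k ≤ 0; Pre_ forces n = 0, so A compares [] with sorted(sizes)
    have hn0 : n = 0 := by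
      rcases hkor with h | h
      · exact absurd h hk
      · omega
    subst hn0
    by_cases hsz : sizes.length = 0
    · have : sizes = [] := List.eq_nil_of_length_eq_zero hsz
      subst this
      rw [pvA_emptybuild 0 k [] le_rfl, pvB_zero_nil k (by omega)]
      simp [PySem.List.sorted_eq_nil_iff]
    · have hA : can_sort_with_k 0 k sizes = false := by
        rw [pvA_emptybuild 0 k sizes le_rfl]
        apply decide_eq_false
        intro heq
        have := congrArg List.length heq
        rw [PySem.List.length_sorted] at this
        simp at this
        exact hsz this.symm
      have hB : can_sort_with_k_alt 0 k sizes = false := by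
        unfold can_sort_with_k_alt
        rw [if_pos (by simp; omega)]
      rw [hA, hB]
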